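-- pv_equiv track=rewrite | github.com/ZG4RBU/Archiver | archiver_packages/youtube/add_comments.py | format_text_emoji
-- ===== SOURCE A (Python) =====
-- def format_text_emoji(input_text:str) -> str:
--     lines = input_text.split('\n')
--     merged_lines = []
--
--     for i in range(len(lines)):
--         if i > 0 and len(lines[i]) == 1:
--             merged_lines[-1] += ' ' + lines[i]
--         else:
--             merged_lines.append(lines[i])
--
--     return '\n'.join(merged_lines)
-- ===== SOURCE B (Python) =====
-- def format_text_emoji(input_text: str) -> str:
--     # Single character-level pass: a '\n' that introduces a line consisting of
--     # exactly one character is replaced by a space; everything else is copied.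
--     out = []
--     i = 0
--     n = len(input_text)
--     while i < n:
--         c = input_text[i]
--         if c == '\n' and i + 1 < n and input_text[i + 1] != '\n' \
--                 and (i + 2 == n or input_text[i + 2] == '\n'):
--             out.append(' ')
--             out.append(input_text[i + 1])
--             i += 2
--         else:
--             out.append(c)
--             i += 1
--     return ''.join(out)
-- ===== Notes on version B (the rewrite author's own statement) =====
-- stated objective: alternative
-- what changed: Replaces A's split-into-lines / merge-list / join pipeline with a single character-level pass that rewrites the newline preceding each single-character line into a space, building the output directly without any line list.
import Mathlib
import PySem

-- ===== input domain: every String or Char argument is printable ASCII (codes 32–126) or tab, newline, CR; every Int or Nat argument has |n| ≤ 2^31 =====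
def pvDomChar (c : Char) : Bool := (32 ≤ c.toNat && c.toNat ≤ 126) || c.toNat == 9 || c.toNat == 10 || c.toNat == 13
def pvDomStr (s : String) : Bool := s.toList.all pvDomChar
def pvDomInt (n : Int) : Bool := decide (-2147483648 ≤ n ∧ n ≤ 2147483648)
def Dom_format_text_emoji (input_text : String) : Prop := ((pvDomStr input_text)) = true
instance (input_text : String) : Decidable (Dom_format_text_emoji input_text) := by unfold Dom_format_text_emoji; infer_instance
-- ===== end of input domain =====

-- B replaces A's split/merge-list/join with one character-level pass that turns the newline
-- before each single-character line into a space (objective: alternative, same cost).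


-- ===== PORT A =====
-- one iteration of A's loop: if i > 0 and len(lines[i]) == 1 then merged_lines[-1] += ' ' + lines[i] else append
def fmtAStep (acc : List (List Char)) (p : Int × List Char) : List (List Char) :=
  if 0 < p.1 ∧ p.2.length = 1 then acc.dropLast ++ [acc.getLast! ++ ' ' :: p.2]
  else acc ++ [p.2]

def format_text_emoji (input_text : String) : String :=
  -- lines = input_text.split('\n'); loop over i, lines[i]; '\n'.join(merged_lines)
  String.ofList (PySem.Chars.join ['\n']
    ((PySem.List.enumerate (PySem.Chars.splitOn input_text.toList ['\n'])).foldl fmtAStep []))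

-- ===== PORT B =====
-- B's while loop over index i, transcribed as recursion on the remaining suffix:
-- [] = loop done; [c] = last char (the lookahead i+1 < n fails); c :: d :: rest = the guarded step.
def fmtB : List Char → List Char
  | [] => []
  | [c] => [c]
  | c :: d :: rest =>
    if c = '\n' ∧ d ≠ '\n' ∧ (rest = [] ∨ rest.head? = some '\n')
    then ' ' :: d :: fmtB rest
    else c :: fmtB (d :: rest)

def format_text_emoji_alt (input_text : String) : String :=
  String.ofList (fmtB input_text.toList)

-- ===== PRECONDITION & SPEC =====
def Spec_format_text_emoji (input_text : String) (out : String) : Prop := out = format_text_emoji_alt input_text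
instance (input_text : String) (out : String) : Decidable (Spec_format_text_emoji input_text out) := by unfold Spec_format_text_emoji; infer_instance

-- ===== CLAIM (what is proved, stated in full; the proofs are below) =====
def Claim_equal_format_text_emoji : Prop := ∀ (input_text : String), Dom_format_text_emoji input_text → Spec_format_text_emoji input_text (format_text_emoji input_text)

-- ===== LEMMAS AND PROOFS =====

/-- Apply `f` to the head of a list (identity on `[]`). -/
def mapHead {α : Type} (f : α → α) : List α → List α
  | [] => []
  | h :: t => f h :: t

/-- Structural form of splitting on a single newline. -/
def split1 : List Char → List (List Char)
  | [] => [[]]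
  | c :: t => if c = '\n' then [] :: split1 t else mapHead (c :: ·) (split1 t)

theorem split1_ne_nil : ∀ (cs : List Char), split1 cs ≠ [] := by
  intro cs
  induction cs with
  | nil => simp [split1]
  | cons c t ih =>
    simp only [split1]
    split
    · simp
    · cases h : split1 t with
      | nil => exact absurd h ih
      | cons b ls => simp [mapHead]

theorem mapHead_mapHead {α : Type} (f g : α → α) (xs : List α) :
    mapHead f (mapHead g xs) = mapHead (fun x => f (g x)) xs := by
  cases xs <;> simp [mapHead]

theorem splitOn_go_newline : ∀ (fuel : Nat) (l cur : List Char) (acc : List (List Char)),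
    l.length ≤ fuel →
    PySem.Chars.splitOn.go ['\n'] fuel l cur acc
      = acc.reverse ++ mapHead (cur.reverse ++ ·) (split1 l) := by
  intro fuel
  induction fuel with
  | zero =>
    intro l cur acc h
    have : l = [] := by cases l <;> simp_all
    subst this
    simp [PySem.Chars.splitOn.go, split1, mapHead]
  | succ n ih =>
    intro l cur acc h
    cases l with
    | nil => simp [PySem.Chars.splitOn.go, split1, mapHead]
    | cons c rest =>
      rw [PySem.Chars.splitOn.go.eq_def]
      by_cases hc : c = '\n'
      · subst hc
        have hpre : List.isPrefixOf ['\n'] ('\n' :: rest) = true := by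
          simp [List.isPrefixOf]
        simp only [hpre, if_pos]
        rw [ih _ _ _ (by simpa using Nat.le_of_succ_le_succ h)]
        simp only [List.length_cons, List.length_nil, Nat.zero_add, List.drop_succ_cons,
          List.drop_zero, List.reverse_cons, List.append_assoc]
        simp only [split1, if_pos]
        cases hs : split1 rest with
        | nil => exact absurd hs (split1_ne_nil rest)
        | cons b ls => simp [mapHead]
      · have hpre : List.isPrefixOf ['\n'] (c :: rest) = false := by
          simp [List.isPrefixOf]
          exact fun h' => absurd h'.symm hc
        simp only [hpre, Bool.false_eq_true, if_false]
        rw [ih _ _ _ (by simpa using Nat.le_of_succ_le_succ h)]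
        simp only [split1, if_neg hc, mapHead_mapHead]
        cases hs : split1 rest with
        | nil => exact absurd hs (split1_ne_nil rest)
        | cons b ls => simp [mapHead]

theorem splitOn_newline (cs : List Char) :
    PySem.Chars.splitOn cs ['\n'] = split1 cs := by
  rw [PySem.Chars.splitOn, splitOn_go_newline _ _ _ _ (Nat.le_succ _)]
  cases hs : split1 cs with
  | nil => exact absurd hs (split1_ne_nil cs)
  | cons b ls => simp [mapHead]

/-- The glue A's merge produces after the first line: a space before each single-char line,
the newline back otherwise. -/
def hFn : List (List Char) → List Char
  | [] => []
  | l :: ls => (if l.length = 1 then ' ' :: l else '\n' :: l) ++ hFn ls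

/-- A's loop body once the index is positive. -/
def stepP (acc : List (List Char)) (l : List Char) : List (List Char) :=
  if l.length = 1 then acc.dropLast ++ [acc.getLast! ++ ' ' :: l] else acc ++ [l]

theorem foldl_enum_pos : ∀ (ls : List (List Char)) (s : Int) (acc : List (List Char)),
    0 < s → (PySem.List.enumerate ls s).foldl fmtAStep acc = ls.foldl stepP acc := by
  intro ls
  induction ls with
  | nil => intro s acc _; simp [PySem.List.enumerate]
  | cons l t ih =>
    intro s acc hs
    rw [PySem.List.enumerate_cons]
    simp only [List.foldl_cons]
    rw [ih (s+1) _ (by omega)]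
    congr 1
    simp [fmtAStep, stepP, hs]

theorem join_cons_ne (a : List Char) (ls : List (List Char)) (h : ls ≠ []) :
    PySem.Chars.join ['\n'] (a :: ls) = a ++ '\n' :: PySem.Chars.join ['\n'] ls := by
  cases ls with
  | nil => exact absurd rfl h
  | cons b u =>
    rw [PySem.Chars.join_cons_cons]
    simp

theorem getLast!_cons_cons (a b : List Char) (u : List (List Char)) :
    (a :: b :: u).getLast! = (b :: u).getLast! := by
  simp [List.getLast!, List.getLast_cons]

theorem join_dropLast_last (x : List Char) : ∀ (acc : List (List Char)), acc ≠ [] →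
    PySem.Chars.join ['\n'] (acc.dropLast ++ [acc.getLast! ++ x])
      = PySem.Chars.join ['\n'] acc ++ x := by
  intro acc
  induction acc with
  | nil => intro h; exact absurd rfl h
  | cons a t ih =>
    intro _
    cases t with
    | nil => simp [PySem.Chars.join_singleton, List.getLast!]
    | cons b u =>
      rw [List.dropLast_cons_of_ne_nil (by simp), getLast!_cons_cons, List.cons_append,
        join_cons_ne a _ (by simp), ih (by simp), join_cons_ne a (b :: u) (by simp)]
      simp

theorem join_append_single (l : List Char) : ∀ (acc : List (List Char)), acc ≠ [] →
    PySem.Chars.join ['\n'] (acc ++ [l])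
      = PySem.Chars.join ['\n'] acc ++ '\n' :: l := by
  intro acc
  induction acc with
  | nil => intro h; exact absurd rfl h
  | cons a t ih =>
    intro _
    cases t with
    | nil => simp [PySem.Chars.join_cons_cons, PySem.Chars.join_singleton]
    | cons b u =>
      rw [List.cons_append, join_cons_ne a _ (by simp), ih (by simp),
        join_cons_ne a (b :: u) (by simp)]
      simp

theorem foldl_stepP_join : ∀ (ls acc : List (List Char)), acc ≠ [] →
    PySem.Chars.join ['\n'] (ls.foldl stepP acc)
      = PySem.Chars.join ['\n'] acc ++ hFn ls := by
  intro ls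
  induction ls with
  | nil => intro acc h; simp [hFn]
  | cons l t ih =>
    intro acc h
    simp only [List.foldl_cons, stepP, hFn]
    by_cases h1 : l.length = 1
    · rw [if_pos h1, if_pos h1, ih _ (by simp), join_dropLast_last _ _ h, List.append_assoc]
    · rw [if_neg h1, if_neg h1, ih _ (by simp), join_append_single _ _ h]
      simp

theorem fmtB_cons_ne_nl (c : Char) (hc : c ≠ '\n') : ∀ (t : List Char),
    fmtB (c :: t) = c :: fmtB t := by
  intro t
  cases t with
  | nil => simp [fmtB]
  | cons d r =>
    rw [fmtB, if_neg (by simp [hc])]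

theorem fmtB_append_of_no_nl : ∀ (p t : List Char), (∀ c ∈ p, c ≠ '\n') →
    fmtB (p ++ t) = p ++ fmtB t := by
  intro p
  induction p with
  | nil => intro t _; simp
  | cons c q ih =>
    intro t h
    rw [List.cons_append, fmtB_cons_ne_nl c (h c (by simp)),
      ih t (fun d hd => h d (by simp [hd]))]
    simp

/-- `seps ls` prefixes every line of `ls` with a newline and concatenates. -/
def seps : List (List Char) → List Char
  | [] => []
  | l :: ls => '\n' :: l ++ seps ls

theorem seps_nil_or_nl (ls : List (List Char)) :
    seps ls = [] ∨ (seps ls).head? = some '\n' := by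
  cases ls <;> simp [seps]

theorem fmtB_seps : ∀ (ls : List (List Char)), (∀ l ∈ ls, ∀ c ∈ l, c ≠ '\n') →
    fmtB (seps ls) = hFn ls := by
  intro ls
  induction ls with
  | nil => intro _; simp [seps, hFn, fmtB]
  | cons l t ih =>
    intro h
    have hl : ∀ c ∈ l, c ≠ '\n' := h l (by simp)
    have ht : ∀ l' ∈ t, ∀ c ∈ l', c ≠ '\n' := fun l' hl' => h l' (by simp [hl'])
    cases l with
    | nil =>
      -- empty line: the newline is kept
      simp only [seps, hFn, if_neg (by simp : ¬([] : List Char).length = 1)]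
      cases ht2 : t with
      | nil => simp [seps, fmtB, hFn]
      | cons m u =>
        subst ht2
        simp only [seps, List.nil_append, List.cons_append]
        rw [fmtB, if_neg (by simp)]
        rw [show '\n' :: (m ++ seps u) = seps (m :: u) from rfl, ih ht]
    | cons d l2 =>
      have hd : d ≠ '\n' := hl d (by simp)
      cases l2 with
      | nil =>
        -- single-char line: merged into the previous one
        simp only [seps, List.cons_append, List.nil_append, hFn,
          if_pos (by simp : ([d] : List Char).length = 1)]
        rw [fmtB, if_pos ⟨rfl, hd, seps_nil_or_nl t⟩, ih ht]
      | cons e l3 =>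
        -- line of length ≥ 2: kept
        have he : e ≠ '\n' := hl e (by simp)
        simp only [seps, List.cons_append, hFn,
          if_neg (by simp : ¬(d :: e :: l3 : List Char).length = 1)]
        rw [fmtB, if_neg (by simp [he])]
        rw [show d :: e :: (l3 ++ seps t) = (d :: e :: l3) ++ seps t by simp]
        rw [fmtB_append_of_no_nl _ _ hl, ih ht]
        simp

theorem glue_split1 : ∀ (cs : List Char),
    (match split1 cs with
     | [] => []
     | a :: ls => a ++ seps ls) = cs := by
  intro cs
  induction cs with
  | nil => simp [split1, seps]
  | cons c t ih =>
    by_cases hc : c = '\n'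
    · subst hc
      simp only [split1, if_pos]
      cases hs : split1 t with
      | nil => exact absurd hs (split1_ne_nil t)
      | cons b ls =>
        rw [hs] at ih
        simpa [seps] using ih
    · simp only [split1, if_neg hc]
      cases hs : split1 t with
      | nil => exact absurd hs (split1_ne_nil t)
      | cons b ls =>
        rw [hs] at ih
        simpa [mapHead] using ih

theorem split1_no_nl : ∀ (cs l : List Char), l ∈ split1 cs → ∀ c ∈ l, c ≠ '\n' := by
  intro cs
  induction cs with
  | nil =>
    intro l hl
    simp only [split1, List.mem_singleton] at hl
    simp [hl]
  | cons c t ih =>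
    intro l hl
    by_cases hc : c = '\n'
    · subst hc
      simp only [split1, if_pos] at hl
      cases hl with
      | head => intro c hc; simp at hc
      | tail _ h' => exact ih l h'
    · simp only [split1, if_neg hc] at hl
      cases hs : split1 t with
      | nil => exact absurd hs (split1_ne_nil t)
      | cons b ls =>
        rw [hs] at hl
        simp only [mapHead, List.mem_cons] at hl
        rcases hl with rfl | hl
        · intro d hd
          rcases List.mem_cons.mp hd with rfl | hd
          · exact hc
          · exact ih b (by simp [hs]) d hd
        · exact ih l (by simp [hs, hl])

-- ===== VERDICT (by name: the statement is the Claim_ definition above) =====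
theorem format_text_emoji_spec : Claim_equal_format_text_emoji := by
  intro input_text _
  unfold Spec_format_text_emoji format_text_emoji format_text_emoji_alt
  set cs := input_text.toList with hcs
  rw [splitOn_newline]
  cases hs : split1 cs with
  | nil => exact absurd hs (split1_ne_nil cs)
  | cons a ls =>
    have hrecon : a ++ seps ls = cs := by
      have := glue_split1 cs
      rw [hs] at this
      simpa using this
    have hnl : ∀ l ∈ (a :: ls), ∀ c ∈ l, c ≠ '\n' := by
      intro l hl
      exact split1_no_nl cs l (hs ▸ hl)
    rw [PySem.List.enumerate_cons]
    simp only [List.foldl_cons]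
    have h0 : fmtAStep [] (0, a) = [a] := by simp [fmtAStep]
    rw [h0, foldl_enum_pos ls (0+1) [a] (by omega), foldl_stepP_join ls [a] (by simp),
      PySem.Chars.join_singleton]
    rw [← hrecon, fmtB_append_of_no_nl a _ (hnl a (by simp)),
      fmtB_seps ls (fun l hl => hnl l (by simp [hl]))]
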